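-- pv_equiv track=rewrite | github.com/wshahbaz/ngram_venn_visualization | szo_venn/gen_venn.py | all_set_count
-- ===== SOURCE A (Python) =====
-- from collections import Counter, defaultdict
--
-- def all_set_count( set1, set2, set3, map1, map2, map3, inds ):
--     all_set = set1.union( set2.union( set3 ) )
--
--     #get count of each ngram where it appears in all 3 groups
--     counts = Counter()
--     for ngram in all_set:
--         #for each ngram, check if it exists in all inds; if so, update count
--         for i in inds:
--             if ngram not in map1 or ngram not in map2 or ngram not in map3:
--                 continue
--             if i in map1[ngram] and i in map2[ngram] and i in map3[ngram]:
--                 counts[ngram] += 1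
--     return counts, set(counts.keys())
-- ===== SOURCE B (Python) =====
-- from collections import Counter
--
-- def all_set_count(set1, set2, set3, map1, map2, map3, inds):
--     mult = Counter(inds)
--
--     def tally(ng):
--         # (ng, count) if ng is mapped in all three maps and the count is nonzero, else None
--         try:
--             common = set(map1[ng]).intersection(map2[ng], map3[ng])
--         except KeyError:
--             return None
--         c = sum(mult[i] for i in common)
--         return (ng, c) if c else None
--
--     pairs = [p for p in map(tally, set1.union(set2.union(set3))) if p is not None]
--     return Counter(dict(pairs)), {ng for ng, _ in pairs}
-- ===== Notes on version B (the rewrite author's own statement) =====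
-- stated objective: faster
-- what changed: A scans inds once per ngram, testing list membership in all three maps for every index; B builds a Counter of inds once and maps each ngram through a tally function that intersects the three index lists as sets and sums the multiplicities of the intersection, assembling the result as a filtered pair list instead of mutating a Counter.
import Mathlib
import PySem

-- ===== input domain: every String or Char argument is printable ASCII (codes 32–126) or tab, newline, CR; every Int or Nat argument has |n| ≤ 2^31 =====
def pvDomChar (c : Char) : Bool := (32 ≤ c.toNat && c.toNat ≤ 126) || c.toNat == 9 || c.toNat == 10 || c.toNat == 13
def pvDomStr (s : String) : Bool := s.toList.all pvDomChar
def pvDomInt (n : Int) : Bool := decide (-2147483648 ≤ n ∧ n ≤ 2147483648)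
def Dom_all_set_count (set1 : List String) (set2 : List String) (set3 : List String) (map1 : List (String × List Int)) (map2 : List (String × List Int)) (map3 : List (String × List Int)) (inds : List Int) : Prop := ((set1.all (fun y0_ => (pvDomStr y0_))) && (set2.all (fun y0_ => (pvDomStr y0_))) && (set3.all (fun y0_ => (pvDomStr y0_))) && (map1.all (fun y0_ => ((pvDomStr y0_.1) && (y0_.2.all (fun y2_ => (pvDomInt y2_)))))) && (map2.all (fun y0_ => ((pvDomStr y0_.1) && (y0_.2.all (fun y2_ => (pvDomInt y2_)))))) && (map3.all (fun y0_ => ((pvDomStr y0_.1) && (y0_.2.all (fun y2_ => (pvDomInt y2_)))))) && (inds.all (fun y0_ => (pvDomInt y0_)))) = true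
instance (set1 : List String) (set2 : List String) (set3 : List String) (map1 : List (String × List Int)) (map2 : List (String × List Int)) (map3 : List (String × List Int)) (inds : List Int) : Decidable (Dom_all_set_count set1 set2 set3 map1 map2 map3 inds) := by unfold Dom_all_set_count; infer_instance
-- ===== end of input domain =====

-- B replaces A's per-ngram scan of inds (membership tests in all three maps per index, Counter
-- mutation) by a Counter of inds built once plus a tally function mapped over the ngrams that
-- intersects the three index lists as sets and sums multiplicities, collecting (ngram, count)
-- pairs; same return value, proved equal below.


-- ===== PORT A =====
def all_set_count (set1 : List String) (set2 : List String) (set3 : List String) (map1 : List (String × List Int)) (map2 : List (String × List Int)) (map3 : List (String × List Int)) (inds : List Int) : (List (String × Int)) × List String :=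
  let all_set : PySem.Set String :=
    PySem.Set.union (PySem.Set.ofList set1) (PySem.Set.union (PySem.Set.ofList set2) set3)
  let m1 := PySem.Dict.mk map1
  let m2 := PySem.Dict.mk map2
  let m3 := PySem.Dict.mk map3
  let counts :=
    all_set.foldl (fun counts ngram =>
      inds.foldl (fun counts i =>
        if ¬ m1.contains ngram ∨ ¬ m2.contains ngram ∨ ¬ m3.contains ngram then counts
        else if i ∈ m1.getD ngram [] ∧ i ∈ m2.getD ngram [] ∧ i ∈ m3.getD ngram [] then
          counts.modify ngram 0 (· + 1)
        else counts) counts) PySem.Dict.empty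
  (counts.items, PySem.Set.ofList counts.keys)

-- ===== PORT B =====
-- helper of B (Source B's inner 'tally'): Some (ng, count) when ng is in all three maps and the
-- multiplicity-sum over the intersection of its three index lists is nonzero, else none
def pvTally (m1 m2 m3 : PySem.Dict String (List Int)) (mult : PySem.Dict Int Int) (ng : String) : Option (String × Int) :=
  match m1.get? ng, m2.get? ng, m3.get? ng with
  | some l1, some l2, some l3 =>
      let common : PySem.Set Int := PySem.Set.inter (PySem.Set.inter (PySem.Set.ofList l1) l2) l3
      let c := (common.map (fun i => mult.getD i 0)).sum
      if c ≠ 0 then some (ng, c) else none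
  | _, _, _ => none

def all_set_count_alt (set1 : List String) (set2 : List String) (set3 : List String) (map1 : List (String × List Int)) (map2 : List (String × List Int)) (map3 : List (String × List Int)) (inds : List Int) : (List (String × Int)) × List String :=
  let mult := PySem.Dict.counter inds
  let pairs :=
    (((PySem.Set.union (PySem.Set.ofList set1) (PySem.Set.union (PySem.Set.ofList set2) set3)).map
      (pvTally (PySem.Dict.mk map1) (PySem.Dict.mk map2) (PySem.Dict.mk map3) mult)).filterMap id)
  (pairs, PySem.Set.ofList (pairs.map Prod.fst))

-- ===== PRECONDITION & SPEC =====
def Spec_all_set_count (set1 : List String) (set2 : List String) (set3 : List String) (map1 : List (String × List Int)) (map2 : List (String × List Int)) (map3 : List (String × List Int)) (inds : List Int) (out : (List (String × Int)) × List String) : Prop := out = all_set_count_alt set1 set2 set3 map1 map2 map3 inds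
instance (set1 : List String) (set2 : List String) (set3 : List String) (map1 : List (String × List Int)) (map2 : List (String × List Int)) (map3 : List (String × List Int)) (inds : List Int) (out : (List (String × Int)) × List String) : Decidable (Spec_all_set_count set1 set2 set3 map1 map2 map3 inds out) := by unfold Spec_all_set_count; infer_instance

-- ===== CLAIM (what is proved, stated in full; the proofs are below) =====
def Claim_equal_all_set_count : Prop := ∀ (set1 : List String) (set2 : List String) (set3 : List String) (map1 : List (String × List Int)) (map2 : List (String × List Int)) (map3 : List (String × List Int)) (inds : List Int), Dom_all_set_count set1 set2 set3 map1 map2 map3 inds → Spec_all_set_count set1 set2 set3 map1 map2 map3 inds (all_set_count set1 set2 set3 map1 map2 map3 inds)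

-- ===== LEMMAS AND PROOFS =====

theorem modify_eq_insert (d : PySem.Dict String Int) (k : String) (f : Int → Int) :
    d.modify k 0 f = d.insert k (f (d.getD k 0)) := by
  simp [PySem.Dict.modify]

theorem modify_loop (l : List Int) (P : Int → Prop) [DecidablePred P]
    (d : PySem.Dict String Int) (k : String) :
    l.foldl (fun d i => if P i then d.modify k 0 (· + 1) else d) d =
      if l.countP (fun i => decide (P i)) = 0 then d
      else d.insert k (d.getD k 0 + (l.countP (fun i => decide (P i)) : Int)) := by
  induction l generalizing d with
  | nil => simp
  | cons j t ih =>
    simp only [List.foldl_cons, List.countP_cons]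
    by_cases hj : P j
    · rw [if_pos hj, ih, modify_eq_insert]
      by_cases ht : t.countP (fun i => decide (P i)) = 0
      · simp [ht, hj]
      · simp only [hj, decide_true, if_true, if_neg ht,
          if_neg (show ¬(t.countP (fun i => decide (P i)) + 1 = 0) by omega)]
        rw [PySem.Dict.insert_insert_self, PySem.Dict.getD_insert_self]
        congr 1
        push_cast
        ring
    · simp [hj, ih]

theorem sum_ite_mem (j : Int) (common : List Int) (h : common.Nodup) :
    (common.map (fun i => if i = j then (1 : Int) else 0)).sum =
      if j ∈ common then (1 : Int) else 0 := by
  induction common with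
  | nil => simp
  | cons a t ih =>
    rcases List.nodup_cons.mp h with ⟨ha, ht⟩
    by_cases haj : a = j
    · subst haj
      simp [ih ht, ha]
    · simp [haj, ih ht, Ne.symm haj]

theorem sum_count_eq_countP (common : List Int) (h : common.Nodup) (inds : List Int) :
    (common.map (fun i => (inds.count i : Int))).sum =
      ((inds.countP (fun i => decide (i ∈ common))) : Int) := by
  induction inds with
  | nil => simp
  | cons j t ih =>
    simp only [List.count_cons, List.countP_cons]
    have : (common.map (fun i => ((t.count i + if j == i then 1 else 0 : Nat) : Int))).sum
        = (common.map (fun i => (t.count i : Int))).sum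
          + (common.map (fun i => if i = j then (1:Int) else 0)).sum := by
      rw [← List.sum_map_add]
      apply congrArg
      apply List.map_congr_left
      intro i _
      by_cases hij : i = j
      · simp [hij]
      · simp [hij, beq_iff_eq, Ne.symm hij]
    rw [this, ih, sum_ite_mem j common h]
    by_cases hj : j ∈ common <;> simp [hj]

-- A's inner loop over inds, as a named step function (definitionally the body of port A)
def stepA (m1 m2 m3 : PySem.Dict String (List Int)) (inds : List Int)
    (counts : PySem.Dict String Int) (ngram : String) : PySem.Dict String Int :=
  inds.foldl (fun counts i =>
    if ¬ m1.contains ngram ∨ ¬ m2.contains ngram ∨ ¬ m3.contains ngram then counts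
    else if i ∈ m1.getD ngram [] ∧ i ∈ m2.getD ngram [] ∧ i ∈ m3.getD ngram [] then
      counts.modify ngram 0 (· + 1)
    else counts) counts

theorem tally_key (m1 m2 m3 : PySem.Dict String (List Int)) (mult : PySem.Dict Int Int)
    (ng : String) (p : String × Int) (h : pvTally m1 m2 m3 mult ng = some p) : p.1 = ng := by
  unfold pvTally at h
  rcases h1 : m1.get? ng with _ | l1 <;> rcases h2 : m2.get? ng with _ | l2 <;>
    rcases h3 : m3.get? ng with _ | l3 <;> simp [h1, h2, h3] at h
  rcases h with ⟨-, h⟩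
  exact congrArg Prod.fst h.symm

-- the key step characterisation: on a fresh key, A's inner loop does exactly what B's tally says
theorem stepA_char (m1 m2 m3 : PySem.Dict String (List Int)) (inds : List Int)
    (d : PySem.Dict String Int) (ng : String) (hfresh : d.contains ng = false) :
    stepA m1 m2 m3 inds d ng =
      match pvTally m1 m2 m3 (PySem.Dict.counter inds) ng with
      | some p => d.insert p.1 p.2
      | none => d := by
  unfold stepA pvTally
  rcases h1 : m1.get? ng with _ | l1 <;> rcases h2 : m2.get? ng with _ | l2 <;>
    rcases h3 : m3.get? ng with _ | l3
  case some.some.some =>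
    have hc1 : m1.contains ng = true := by rw [PySem.Dict.contains_eq_isSome_get?, h1]; rfl
    have hc2 : m2.contains ng = true := by rw [PySem.Dict.contains_eq_isSome_get?, h2]; rfl
    have hc3 : m3.contains ng = true := by rw [PySem.Dict.contains_eq_isSome_get?, h3]; rfl
    have hg1 : m1.getD ng [] = l1 := PySem.Dict.getD_of_get?_eq_some _ _ h1
    have hg2 : m2.getD ng [] = l2 := PySem.Dict.getD_of_get?_eq_some _ _ h2
    have hg3 : m3.getD ng [] = l3 := PySem.Dict.getD_of_get?_eq_some _ _ h3
    have hbody : ∀ (dd : PySem.Dict String Int), ∀ i ∈ inds,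
        (fun (counts : PySem.Dict String Int) i =>
          if ¬ m1.contains ng ∨ ¬ m2.contains ng ∨ ¬ m3.contains ng then counts
          else if i ∈ m1.getD ng [] ∧ i ∈ m2.getD ng [] ∧ i ∈ m3.getD ng [] then
            counts.modify ng 0 (· + 1)
          else counts) dd i
        = (fun (counts : PySem.Dict String Int) i =>
            if i ∈ l1 ∧ i ∈ l2 ∧ i ∈ l3 then counts.modify ng 0 (· + 1) else counts) dd i := by
      intro dd i _
      simp [hc1, hc2, hc3, hg1, hg2, hg3]
    rw [PySem.List.foldl_congr_mem _ _ _ d hbody, modify_loop]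
    rw [PySem.Dict.getD_of_not_contains d 0 hfresh]
    simp only [zero_add]
    set common : PySem.Set Int :=
      PySem.Set.inter (PySem.Set.inter (PySem.Set.ofList l1) l2) l3 with hcommon
    have hnd : common.Nodup :=
      PySem.Set.nodup_inter _ _ (PySem.Set.nodup_inter _ _ (PySem.Set.nodup_ofList _))
    have hmem : ∀ i : Int, i ∈ common ↔ (i ∈ l1 ∧ i ∈ l2 ∧ i ∈ l3) := by
      intro i
      simp [hcommon, PySem.Set.mem_inter, PySem.Set.mem_ofList, and_assoc]
    have hsum : (common.map (fun i => (PySem.Dict.counter inds).getD i 0)).sum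
        = ((inds.countP (fun i => decide (i ∈ l1 ∧ i ∈ l2 ∧ i ∈ l3))) : Int) := by
      have : (common.map (fun i => (PySem.Dict.counter inds).getD i 0))
          = common.map (fun i => (inds.count i : Int)) := by
        apply List.map_congr_left; intro i _; exact PySem.Dict.getD_counter inds i
      rw [this, sum_count_eq_countP common hnd inds]
      congr 1
      apply List.countP_congr
      intro a _
      simp [hmem a]
    simp only [hsum]
    by_cases hn : inds.countP (fun i => decide (i ∈ l1 ∧ i ∈ l2 ∧ i ∈ l3)) = 0
    · rw [if_pos hn, if_neg (by rw [hn]; norm_num)]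
    · rw [if_neg hn, if_pos (by exact_mod_cast hn)]
  all_goals {
    have hcf : m1.contains ng = false ∨ m2.contains ng = false ∨ m3.contains ng = false := by
      first
      | exact Or.inl (by rw [PySem.Dict.contains_eq_isSome_get?, h1]; rfl)
      | exact Or.inr (Or.inl (by rw [PySem.Dict.contains_eq_isSome_get?, h2]; rfl))
      | exact Or.inr (Or.inr (by rw [PySem.Dict.contains_eq_isSome_get?, h3]; rfl))
    have hbody : ∀ (dd : PySem.Dict String Int), ∀ i ∈ inds,
        (fun (counts : PySem.Dict String Int) i =>
          if ¬ m1.contains ng ∨ ¬ m2.contains ng ∨ ¬ m3.contains ng then counts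
          else if i ∈ m1.getD ng [] ∧ i ∈ m2.getD ng [] ∧ i ∈ m3.getD ng [] then
            counts.modify ng 0 (· + 1)
          else counts) dd i = dd := by
      intro dd i _
      dsimp only
      rw [if_pos (by rcases hcf with h | h | h <;> simp [h])]
    rw [PySem.List.foldl_congr_mem _ _ (fun (acc : PySem.Dict String Int) (_ : Int) => acc) d hbody,
      PySem.List.foldl_ignore]
  }

-- the outer loop of A, over distinct fresh keys, appends exactly B's tally results to the items
theorem items_foldl_stepA (m1 m2 m3 : PySem.Dict String (List Int)) (inds : List Int)
    (L : List String) (hnd : L.Nodup) (d : PySem.Dict String Int)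
    (hd : ∀ ng ∈ L, d.contains ng = false) :
    (L.foldl (stepA m1 m2 m3 inds) d).items =
      d.items ++ (L.map (pvTally m1 m2 m3 (PySem.Dict.counter inds))).filterMap id := by
  induction L generalizing d with
  | nil => simp
  | cons ng t ih =>
    rcases List.nodup_cons.mp hnd with ⟨hng, hnt⟩
    simp only [List.foldl_cons, List.map_cons, List.filterMap_cons]
    rw [stepA_char m1 m2 m3 inds d ng (hd ng (by simp))]
    rcases ht : pvTally m1 m2 m3 (PySem.Dict.counter inds) ng with _ | p
    · simp only [id]
      exact ih hnt d (fun x hx => hd x (by simp [hx]))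
    · have hkey : p.1 = ng := tally_key _ _ _ _ _ _ ht
      have hfr : d.contains p.1 = false := by rw [hkey]; exact hd ng (by simp)
      have hfr' : ∀ x ∈ t, (d.insert p.1 p.2).contains x = false := by
        intro x hx
        rw [PySem.Dict.contains_insert]
        have hxne : x ≠ p.1 := by rw [hkey]; exact fun h => hng (h ▸ hx)
        simp [hxne, hd x (by simp [hx])]
      simp only [id]
      rw [ih hnt _ hfr', PySem.Dict.items_insert_of_not_contains _ _ hfr]
      simp

-- ===== VERDICT (by name: the statement is the Claim_ definition above) =====
theorem all_set_count_spec : Claim_equal_all_set_count := by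
  intro set1 set2 set3 map1 map2 map3 inds _
  unfold Spec_all_set_count
  have h := items_foldl_stepA (PySem.Dict.mk map1) (PySem.Dict.mk map2) (PySem.Dict.mk map3)
    inds (PySem.Set.union (PySem.Set.ofList set1) (PySem.Set.union (PySem.Set.ofList set2) set3))
    (PySem.Set.nodup_union _ _ (PySem.Set.nodup_ofList set1))
    PySem.Dict.empty (fun ng _ => PySem.Dict.contains_empty ng)
  exact congrArg (fun l : List (String × Int) => (l, PySem.Set.ofList (l.map Prod.fst))) h
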